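-- pv_equiv track=rewrite | github.com/xBirch/adventofcode | 2023/day7.py | check_one_pairs
-- ===== SOURCE A (Python) =====
-- from collections import defaultdict
--
-- def check_one_pairs(hand):
--     values = [*hand[0]]
--     value_counts = defaultdict(lambda:0)
--     for v in values:
--         value_counts[v]+=1
--     if 2 in value_counts.values():
--         return hand[1]
--     else:
--         return 0
-- ===== SOURCE B (Python) =====
-- def check_one_pairs(hand):
--     # sort-then-run-length: group equal cards as consecutive runs of the sorted hand
--     s = sorted(hand[0])
--     while s:
--         run = 1
--         while run < len(s) and s[run] == s[0]:
--             run += 1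
--         if run == 2:
--             return hand[1]
--         s = s[run:]
--     return 0
-- ===== Notes on version B (the rewrite author's own statement) =====
-- stated objective: alternative
-- what changed: Replaces the defaultdict tally plus values() membership test with sorting the hand and scanning consecutive equal-card run lengths, returning hand[1] at the first run of length exactly 2.
import Mathlib
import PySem

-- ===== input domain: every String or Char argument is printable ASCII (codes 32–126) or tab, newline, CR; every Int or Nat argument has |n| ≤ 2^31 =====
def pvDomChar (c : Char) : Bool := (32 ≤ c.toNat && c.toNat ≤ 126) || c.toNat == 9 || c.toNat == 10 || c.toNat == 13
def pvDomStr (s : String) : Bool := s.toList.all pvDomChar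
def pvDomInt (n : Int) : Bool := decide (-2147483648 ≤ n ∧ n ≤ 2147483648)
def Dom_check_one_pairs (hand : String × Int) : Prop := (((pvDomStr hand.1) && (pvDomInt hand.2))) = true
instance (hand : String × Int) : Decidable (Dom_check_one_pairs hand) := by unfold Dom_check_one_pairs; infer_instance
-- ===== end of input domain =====

-- B replaces A's defaultdict tally with a sort-then-run-length scan of the hand (alternative algorithm, same result).


-- ===== PORT A =====
def check_one_pairs (hand : String × Int) : Int :=
  let values := hand.1.toList
  let value_counts := values.foldl (fun d v => d.modify v 0 (· + 1)) (PySem.Dict.empty : PySem.Dict Char Int)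
  if (2 : Int) ∈ value_counts.values then hand.2 else 0

-- ===== PORT B =====
-- length of the leading run of c (inner while loop of Source B, counting from s[1:])
def pvRun (c : Char) : List Char → Nat
  | [] => 0
  | x :: xs => if x = c then pvRun c xs + 1 else 0

-- outer while loop of Source B: examine each run of the sorted list, slicing it off
def pvScan (val : Int) : List Char → Int
  | [] => 0
  | c :: rest =>
      let run := pvRun c rest + 1
      if run = 2 then val else pvScan val (rest.drop (pvRun c rest))
termination_by s => s.length
decreasing_by simp

def check_one_pairs_alt (hand : String × Int) : Int :=
  pvScan hand.2 (PySem.List.sorted hand.1.toList (fun x => x) false)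

-- ===== PRECONDITION & SPEC =====
def Spec_check_one_pairs (hand : String × Int) (out : Int) : Prop := out = check_one_pairs_alt hand
instance (hand : String × Int) (out : Int) : Decidable (Spec_check_one_pairs hand out) := by unfold Spec_check_one_pairs; infer_instance

-- ===== CLAIM (what is proved, stated in full; the proofs are below) =====
def Claim_equal_check_one_pairs : Prop := ∀ (hand : String × Int), Dom_check_one_pairs hand → Spec_check_one_pairs hand (check_one_pairs hand)

-- ===== LEMMAS AND PROOFS =====

-- the leading run of a sorted tail: length = count of c, everything after it is > c
theorem pvRun_spec (c : Char) (rest : List Char)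
    (hs : rest.Pairwise (· ≤ ·)) (hge : ∀ y ∈ rest, c ≤ y) :
    rest.count c = pvRun c rest ∧ ∀ y ∈ rest.drop (pvRun c rest), c < y := by
  induction rest with
  | nil => simp [pvRun]
  | cons x t ih =>
    rcases List.pairwise_cons.mp hs with ⟨hxt, ht⟩
    by_cases hx : x = c
    · subst hx
      obtain ⟨h1, h2⟩ := ih ht hxt
      refine ⟨by simp [pvRun, h1], ?_⟩
      intro y hy
      simp only [pvRun] at hy
      exact h2 y (by simpa using hy)
    · have hcx : c < x := lt_of_le_of_ne (hge x (by simp)) (fun h => hx (Eq.symm h))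
      constructor
      · simp only [pvRun, if_neg hx]
        rw [List.count_eq_zero]
        intro hmem
        rcases List.mem_cons.mp hmem with h | h
        · exact hx (Eq.symm h)
        · exact absurd (hxt c h) (not_le.mpr hcx)
      · simp only [pvRun, if_neg hx, List.drop_zero]
        intro y hy
        rcases List.mem_cons.mp hy with h | h
        · exact h ▸ hcx
        · exact lt_of_lt_of_le hcx (hxt y h)

-- the leading run consists only of c
theorem pvRun_take (c : Char) (rest : List Char) :
    ∀ y ∈ rest.take (pvRun c rest), y = c := by
  induction rest with
  | nil => simp
  | cons x t ih =>
    intro y hy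
    by_cases hx : x = c
    · subst hx
      simp only [pvRun] at hy
      rcases List.mem_cons.mp hy with h | h
      · exact h
      · exact ih y h
    · simp [pvRun, if_neg hx] at hy

-- pvScan on a sorted list decides "some run has length exactly 2"
theorem pvScan_spec (val : Int) : ∀ (n : Nat) (s : List Char), s.length ≤ n →
    s.Pairwise (· ≤ ·) →
    pvScan val s = if ∃ c ∈ s, s.count c = 2 then val else 0 := by
  intro n
  induction n with
  | zero =>
    intro s hlen _
    have : s = [] := List.eq_nil_of_length_eq_zero (Nat.le_zero.mp hlen)
    subst this; simp [pvScan]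
  | succ n ih =>
    intro s hlen hs
    match s with
    | [] => simp [pvScan]
    | c :: rest =>
      rcases List.pairwise_cons.mp hs with ⟨hc, ht⟩
      obtain ⟨hcount, hgt⟩ := pvRun_spec c rest ht hc
      rw [pvScan]
      set r := pvRun c rest with hr
      set tail := rest.drop r with htail
      have hlen2 : tail.length = rest.length - r := by rw [htail, List.length_drop]
      simp only [List.length_cons] at hlen
      have htsorted : tail.Pairwise (· ≤ ·) := ht.sublist (List.drop_sublist _ _)
      have hcount_other : ∀ d, d ≠ c → (c :: rest).count d = tail.count d := by
        intro d hd
        have hsplit : rest = rest.take r ++ tail := Eq.symm (List.take_append_drop r rest)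
        have hzero : (rest.take r).count d = 0 := by
          rw [List.count_eq_zero]
          intro hmem
          exact hd (pvRun_take c rest d hmem)
        have : rest.count d = tail.count d := by
          conv_lhs => rw [hsplit]
          rw [List.count_append, hzero]
          omega
        simp [List.count_cons, this, Ne.symm hd]
      clear_value tail r
      by_cases hrun : r + 1 = 2
      · rw [if_pos hrun]
        have hex : ∃ d ∈ c :: rest, (c :: rest).count d = 2 := by
          refine ⟨c, by simp, ?_⟩
          simp [hcount]
          omega
        rw [if_pos hex]
      · rw [if_neg hrun]
        have hlen' : tail.length ≤ n := by omega

        rw [ih tail hlen' htsorted]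
        have hiff : (∃ d ∈ c :: rest, (c :: rest).count d = 2) ↔ (∃ d ∈ tail, tail.count d = 2) := by
          constructor
          · rintro ⟨d, _, hdcount⟩
            by_cases hd : d = c
            · exfalso
              subst hd
              simp [hcount] at hdcount
              omega
            · refine ⟨d, ?_, (hcount_other d hd) ▸ hdcount⟩
              rw [← List.count_pos_iff, ← hcount_other d hd]
              omega
          · rintro ⟨d, hdmem, hdcount⟩
            have hd : d ≠ c := ne_of_gt (hgt d hdmem)
            refine ⟨d, List.mem_cons_of_mem _ (List.mem_of_mem_drop (htail ▸ hdmem)),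
              (hcount_other d hd).trans hdcount⟩
        by_cases hex : ∃ d ∈ c :: rest, (c :: rest).count d = 2
        · rw [if_pos hex, if_pos (hiff.mp hex)]
        · rw [if_neg hex, if_neg (fun h => hex (hiff.mpr h))]

-- A's result in the same closed form
theorem check_one_pairs_eq (hand : String × Int) :
    check_one_pairs hand =
      if ∃ c ∈ hand.1.toList, hand.1.toList.count c = 2 then hand.2 else 0 := by
  show (if (2 : Int) ∈ (hand.1.toList.foldl (fun d v => d.modify v 0 (· + 1))
      (PySem.Dict.empty : PySem.Dict Char Int)).values then hand.2 else 0) = _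
  have hc : hand.1.toList.foldl (fun d v => d.modify v 0 (· + 1))
      (PySem.Dict.empty : PySem.Dict Char Int) = PySem.Dict.counter hand.1.toList :=
    Eq.symm (PySem.Dict.counter_eq_foldl _)
  rw [hc]
  have hv : (PySem.Dict.counter hand.1.toList).values =
      (PySem.Set.ofList hand.1.toList).map (fun k => (hand.1.toList.count k : Int)) := by
    rw [PySem.Dict.values_eq_map_keys _ (PySem.Dict.nodup_keys_counter _) 0,
        PySem.Dict.keys_counter]
    exact List.map_congr_left (fun k _ => PySem.Dict.getD_counter _ _)
  rw [hv]
  have hiff : ((2 : Int) ∈ (PySem.Set.ofList hand.1.toList).map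
      (fun k => (hand.1.toList.count k : Int))) ↔
      (∃ c ∈ hand.1.toList, hand.1.toList.count c = 2) := by
    rw [List.mem_map]
    constructor
    · rintro ⟨k, hk, hkv⟩
      exact ⟨k, (PySem.Set.mem_ofList _ _).mp hk, by exact_mod_cast hkv⟩
    · rintro ⟨k, hk, hkv⟩
      exact ⟨k, (PySem.Set.mem_ofList _ _).mpr hk, by exact_mod_cast hkv⟩
  by_cases h : ∃ c ∈ hand.1.toList, hand.1.toList.count c = 2
  · rw [if_pos (hiff.mpr h), if_pos h]
  · rw [if_neg (fun hm => h (hiff.mp hm)), if_neg h]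

-- ===== VERDICT (by name: the statement is the Claim_ definition above) =====
theorem check_one_pairs_spec : Claim_equal_check_one_pairs := by
  intro hand _
  unfold Spec_check_one_pairs check_one_pairs_alt
  set l := hand.1.toList with hl
  set s := PySem.List.sorted l (fun x => x) false with hss
  have hperm : s.Perm l := PySem.List.sorted_perm _ _ _
  have hsorted : s.Pairwise (· ≤ ·) := PySem.List.sorted_pairwise _ _
  rw [pvScan_spec hand.2 s.length s le_rfl hsorted, check_one_pairs_eq]
  have hiff : (∃ c ∈ l, l.count c = 2) ↔ (∃ c ∈ s, s.count c = 2) := by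
    constructor
    · rintro ⟨c, hcm, hcc⟩
      exact ⟨c, hperm.mem_iff.mpr hcm, (hperm.count_eq c).trans hcc⟩
    · rintro ⟨c, hcm, hcc⟩
      exact ⟨c, hperm.mem_iff.mp hcm, (Eq.symm (hperm.count_eq c)).trans hcc⟩
  by_cases h : ∃ c ∈ l, l.count c = 2
  · rw [if_pos h, if_pos (hiff.mp h)]
  · rw [if_neg h, if_neg (fun hm => h (hiff.mpr hm))]
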